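-- pv_equiv track=rewrite | github.com/dumbified/RMA-Camera-FA-Report-generator | adv_classification.py | classify_image
-- ===== SOURCE A (Python) =====
-- def classify_image(segment_labels):
--     if all(label == "DIE" for label in segment_labels):
--         return "WHOLE SEGMENT"
--     if "DIE" in segment_labels:
--         return "DIE SEGMENT"
--     if "WHITE" in segment_labels:
--         return "WHITE SEGMENT"
--     return "PERFECT"
-- ===== SOURCE B (Python) =====
-- def classify_image(segment_labels):
--     die_count = 0
--     total = 0
--     white_seen = False
--     for label in segment_labels:
--         if label == "DIE":
--             die_count += 1
--         if label == "WHITE":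
--             white_seen = True
--         total += 1
--     if die_count == total:
--         return "WHOLE SEGMENT"
--     elif die_count > 0:
--         return "DIE SEGMENT"
--     elif white_seen:
--         return "WHITE SEGMENT"
--     else:
--         return "PERFECT"
-- ===== Notes on version B (the rewrite author's own statement) =====
-- stated objective: alternative
-- what changed: Replaces A's up-to-three short-circuiting scans (all(), two membership tests) with a single tally pass accumulating a DIE count, the length and a WHITE flag, followed by one decision block.
import Mathlib
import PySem

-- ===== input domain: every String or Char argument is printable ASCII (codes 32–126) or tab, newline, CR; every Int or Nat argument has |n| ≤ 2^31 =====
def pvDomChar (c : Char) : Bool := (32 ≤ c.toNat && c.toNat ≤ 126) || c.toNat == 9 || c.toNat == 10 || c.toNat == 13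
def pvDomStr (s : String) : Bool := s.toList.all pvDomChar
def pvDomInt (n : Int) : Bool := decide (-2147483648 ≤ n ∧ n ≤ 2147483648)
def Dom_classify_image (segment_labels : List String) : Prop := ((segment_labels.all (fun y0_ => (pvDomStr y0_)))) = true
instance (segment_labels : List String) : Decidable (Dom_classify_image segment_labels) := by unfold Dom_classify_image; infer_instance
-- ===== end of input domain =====

-- B replaces A's up-to-three short-circuit scans with one tally pass and a decision block (alternative decomposition, same cost).

-- ===== PORT A =====
def classify_image (segment_labels : List String) : String :=
  if segment_labels.all (fun label => label == "DIE") then "WHOLE SEGMENT"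
  else if segment_labels.contains "DIE" then "DIE SEGMENT"
  else if segment_labels.contains "WHITE" then "WHITE SEGMENT"
  else "PERFECT"

-- ===== PORT B =====
def classify_image_alt (segment_labels : List String) : String :=
  let s := segment_labels.foldl
    (fun (s : Nat × Nat × Bool) label =>
      (s.1 + (if label = "DIE" then 1 else 0),
       s.2.1 + 1,
       s.2.2 || (label == "WHITE"))) (0, 0, false)
  if s.1 = s.2.1 then "WHOLE SEGMENT"
  else if s.1 > 0 then "DIE SEGMENT"
  else if s.2.2 then "WHITE SEGMENT"
  else "PERFECT"

-- ===== PRECONDITION & SPEC =====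
def Spec_classify_image (segment_labels : List String) (out : String) : Prop := out = classify_image_alt segment_labels
instance (segment_labels : List String) (out : String) : Decidable (Spec_classify_image segment_labels out) := by unfold Spec_classify_image; infer_instance

-- ===== CLAIM (what is proved, stated in full; the proofs are below) =====
def Claim_equal_classify_image : Prop := ∀ (segment_labels : List String), Dom_classify_image segment_labels → Spec_classify_image segment_labels (classify_image segment_labels)

-- ===== LEMMAS AND PROOFS =====

theorem classify_fold_char (xs : List String) : ∀ (a b : Nat) (c : Bool),
    xs.foldl (fun (s : Nat × Nat × Bool) label =>
      (s.1 + (if label = "DIE" then 1 else 0),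
       s.2.1 + 1,
       s.2.2 || (label == "WHITE"))) (a, b, c)
    = (a + xs.count "DIE", b + xs.length, c || xs.any (fun l => l == "WHITE")) := by
  induction xs with
  | nil => intro a b c; simp
  | cons x xs ih =>
      intro a b c
      simp only [List.foldl_cons, ih, List.count_cons, List.length_cons, List.any_cons]
      refine Prod.ext ?_ (Prod.ext ?_ ?_)
      · by_cases h : x = "DIE" <;> simp [h] <;> omega
      · simp; omega
      · simp [Bool.or_assoc]

-- ===== VERDICT (by name: the statement is the Claim_ definition above) =====
theorem classify_image_spec : Claim_equal_classify_image := by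
  intro xs _
  show classify_image xs = classify_image_alt xs
  unfold classify_image classify_image_alt
  rw [classify_fold_char]
  simp only [Nat.zero_add, Bool.false_or]
  by_cases hall : xs.all (fun label => label == "DIE") = true
  · have hcl : xs.count "DIE" = xs.length := by
      simp only [List.all_eq_true, beq_iff_eq] at hall
      rw [List.count_eq_length]
      intro b hb; exact ((hall b hb)).symm ▸ rfl
    simp [hall, hcl]
  · have hne : xs.count "DIE" ≠ xs.length := by
      intro h
      apply hall
      rw [List.count_eq_length] at h
      simp only [List.all_eq_true, beq_iff_eq]
      intro b hb; exact (h b hb).symm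
    by_cases hdie : "DIE" ∈ xs
    · have hpos : 0 < xs.count "DIE" := List.count_pos_iff.mpr hdie
      simp [hall, hdie, hne, hpos]
    · have hz : xs.count "DIE" = 0 := by
        by_contra h
        exact hdie (List.count_pos_iff.mp (Nat.pos_of_ne_zero h))
      have hlen : xs.length ≠ 0 := by omega
      by_cases hwm : "WHITE" ∈ xs
      · have hany : xs.any (fun l => l == "WHITE") = true := by
          simp only [List.any_eq_true, beq_iff_eq]; exact ⟨"WHITE", hwm, rfl⟩
        simp [hall, hdie, hz, hlen.symm, hany, hwm]
      · have hany : xs.any (fun l => l == "WHITE") = false := by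
          simp only [List.any_eq_false, beq_iff_eq]
          intro l hl he; exact hwm (he ▸ hl)
        simp [hall, hdie, hz, hlen.symm, hany, hwm]
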